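-- pv_equiv track=rewrite | github.com/vinash85/LitGene | code/full/contrastiveLearning/src/utils.py | map_strLabels
-- ===== SOURCE A (Python) =====
-- def map_strLabels(string_labels):
--
--     class_map = dict()
--     integer_labels = []
--
--
--     for labels in string_labels:
--         integer_label_list = []
--         for label in labels:
--             if label not in class_map:
--                 class_map[label] = len(class_map) + 1
--             integer_label_list.append(class_map[label])
--         integer_labels.append(integer_label_list)
--     return integer_labels, class_map
-- ===== SOURCE B (Python) =====
-- def map_strLabels(string_labels):
--     flat = [label for labels in string_labels for label in labels]
--     class_map = {label: i for i, label in enumerate(dict.fromkeys(flat), start=1)}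
--     integer_labels = [[class_map[label] for label in labels] for labels in string_labels]
--     return integer_labels, class_map
-- ===== Notes on version B (the rewrite author's own statement) =====
-- stated objective: idiomatic
-- what changed: Replaces A's single interleaved loop (mutating the dict while emitting codes) with index-then-translate: dict.fromkeys dedups the flattened labels in first-appearance order, enumerate(..., start=1) builds class_map in one comprehension, and a separate nested comprehension translates by pure lookup.
import Mathlib
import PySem

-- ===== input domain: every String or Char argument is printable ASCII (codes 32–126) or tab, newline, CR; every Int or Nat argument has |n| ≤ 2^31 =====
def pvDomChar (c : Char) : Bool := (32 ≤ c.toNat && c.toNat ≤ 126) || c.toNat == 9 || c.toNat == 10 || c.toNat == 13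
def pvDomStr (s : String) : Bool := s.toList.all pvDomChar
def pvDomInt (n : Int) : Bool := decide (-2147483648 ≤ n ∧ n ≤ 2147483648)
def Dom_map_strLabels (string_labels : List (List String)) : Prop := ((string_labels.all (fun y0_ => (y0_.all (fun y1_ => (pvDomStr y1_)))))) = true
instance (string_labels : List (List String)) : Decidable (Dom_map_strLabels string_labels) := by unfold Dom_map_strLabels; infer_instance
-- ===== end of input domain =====

-- B replaces A's single interleaved loop with dedup-then-enumerate index building plus a separate
-- pure-lookup translation pass (idiomatic; same cost, same return value).

-- ===== PORT A =====
-- if label not in class_map: class_map[label] = len(class_map) + 1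
def aStep (cm : PySem.Dict String Int) (label : String) : PySem.Dict String Int :=
  if cm.contains label then cm else cm.insert label ((cm.size : Int) + 1)

-- one iteration of A's inner loop: maybe insert, then append class_map[label]
def aInner (st : PySem.Dict String Int × List Int) (label : String) :
    PySem.Dict String Int × List Int :=
  let cm := aStep st.1 label
  (cm, st.2 ++ [cm.getD label 0])

-- one iteration of A's outer loop: run the inner loop, append integer_label_list
def aRow (st : PySem.Dict String Int × List (List Int)) (labels : List String) :
    PySem.Dict String Int × List (List Int) :=
  let r := labels.foldl aInner (st.1, [])
  (r.1, st.2 ++ [r.2])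

def map_strLabels (string_labels : List (List String)) :
    List (List Int) × (List (String × Int)) :=
  let st := string_labels.foldl aRow (PySem.Dict.empty, [])
  (st.2, st.1.items)

-- ===== PORT B =====
def map_strLabels_alt (string_labels : List (List String)) :
    List (List Int) × (List (String × Int)) :=
  let flat := string_labels.flatMap (fun labels => labels)
  let class_map : PySem.Dict String Int :=
    PySem.Dict.ofList ((PySem.List.enumerate (PySem.List.dedup flat) 1).map (fun p => (p.2, p.1)))
  let integer_labels := string_labels.map (fun labels => labels.map (fun label => class_map.getD label 0))
  (integer_labels, class_map.items)

-- ===== PRECONDITION & SPEC =====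
def Spec_map_strLabels (string_labels : List (List String)) (out : List (List Int) × (List (String × Int))) : Prop := out = map_strLabels_alt string_labels
instance (string_labels : List (List String)) (out : List (List Int) × (List (String × Int))) : Decidable (Spec_map_strLabels string_labels out) := by unfold Spec_map_strLabels; infer_instance

-- ===== CLAIM (what is proved, stated in full; the proofs are below) =====
def Claim_equal_map_strLabels : Prop := ∀ (string_labels : List (List String)), Dom_map_strLabels string_labels → Spec_map_strLabels string_labels (map_strLabels string_labels)

-- ===== LEMMAS AND PROOFS =====

-- the association list B's class_map is built from
def pairsOf (xs : List String) : List (String × Int) :=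
  (PySem.List.enumerate (PySem.List.dedup xs) 1).map (fun p => (p.2, p.1))

theorem aStep_of_contains (d : PySem.Dict String Int) (l : String)
    (hc : d.contains l = true) : aStep d l = d := by
  simp [aStep, hc]

theorem aStep_of_not_contains (d : PySem.Dict String Int) (l : String)
    (hc : d.contains l = false) : aStep d l = d.insert l ((d.size : Int) + 1) := by
  simp [aStep, hc]

theorem get?_aStep_mono (d : PySem.Dict String Int) (l k : String) (v : Int)
    (h : d.get? k = some v) : (aStep d l).get? k = some v := by
  by_cases hc : d.contains l = true
  · rw [aStep_of_contains d l hc]; exact h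
  · rw [aStep_of_not_contains d l (Bool.not_eq_true _ ▸ hc)]
    rw [PySem.Dict.get?_insert]
    split
    · next he =>
      subst he
      rw [PySem.Dict.contains_eq_isSome_get?, h] at hc
      simp at hc
    · exact h

theorem get?_buildL_mono (ls : List String) (d : PySem.Dict String Int) (k : String) (v : Int)
    (h : d.get? k = some v) : (ls.foldl aStep d).get? k = some v := by
  induction ls generalizing d with
  | nil => exact h
  | cons x xs ih => exact ih (aStep d x) (get?_aStep_mono d x k v h)

theorem get?_buildLL_mono (lls : List (List String)) (d : PySem.Dict String Int) (k : String) (v : Int)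
    (h : d.get? k = some v) :
    (lls.foldl (fun d ls => ls.foldl aStep d) d).get? k = some v := by
  induction lls generalizing d with
  | nil => exact h
  | cons x xs ih => exact ih _ (get?_buildL_mono x d k v h)

theorem get?_aStep_self (d : PySem.Dict String Int) (l : String) :
    ∃ v, (aStep d l).get? l = some v := by
  by_cases hc : d.contains l = true
  · rw [aStep_of_contains d l hc]
    rw [PySem.Dict.contains_eq_isSome_get?] at hc
    exact Option.isSome_iff_exists.mp hc
  · rw [aStep_of_not_contains d l (Bool.not_eq_true _ ▸ hc)]
    exact ⟨_, PySem.Dict.get?_insert_self _ _ _⟩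

theorem get?_buildL_of_mem (ls : List String) (d : PySem.Dict String Int) (l : String)
    (h : l ∈ ls) : ∃ v, (ls.foldl aStep d).get? l = some v := by
  induction ls generalizing d with
  | nil => cases h
  | cons x xs ih =>
    rcases List.mem_cons.mp h with he | hm
    · subst he
      obtain ⟨v, hv⟩ := get?_aStep_self d l
      exact ⟨v, get?_buildL_mono xs _ l v hv⟩
    · exact ih _ hm

-- A's inner loop = build the dict over the row, and translate with the row-final dict
theorem inner_eq (labels : List String) (d : PySem.Dict String Int) (out : List Int) :
    labels.foldl aInner (d, out)
      = (labels.foldl aStep d,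
         out ++ labels.map (fun l => (labels.foldl aStep d).getD l 0)) := by
  induction labels generalizing d out with
  | nil => simp
  | cons x xs ih =>
    have hstep : aInner (d, out) x = (aStep d x, out ++ [(aStep d x).getD x 0]) := rfl
    obtain ⟨v, hv⟩ := get?_aStep_self d x
    have hpres := get?_buildL_mono xs (aStep d x) x v hv
    calc (x :: xs).foldl aInner (d, out)
        = xs.foldl aInner (aStep d x, out ++ [(aStep d x).getD x 0]) := by
          rw [List.foldl_cons, hstep]
      _ = (xs.foldl aStep (aStep d x),
            (out ++ [(aStep d x).getD x 0])
              ++ xs.map (fun l => (xs.foldl aStep (aStep d x)).getD l 0)) := ih _ _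
      _ = ((x :: xs).foldl aStep d,
            out ++ (x :: xs).map (fun l => ((x :: xs).foldl aStep d).getD l 0)) := by
          simp only [List.foldl_cons, List.map_cons]
          rw [PySem.Dict.getD_of_get?_eq_some _ 0 hv,
              PySem.Dict.getD_of_get?_eq_some _ 0 hpres]
          simp

-- A's outer loop = build the dict over all rows, and translate every row with the final dict
theorem outer_eq (lls : List (List String)) (d : PySem.Dict String Int) (acc : List (List Int)) :
    lls.foldl aRow (d, acc)
      = (lls.foldl (fun d ls => ls.foldl aStep d) d,
         acc ++ lls.map (fun ls => ls.map (fun l =>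
           (lls.foldl (fun d ls => ls.foldl aStep d) d).getD l 0))) := by
  induction lls generalizing d acc with
  | nil => simp
  | cons row rest ih =>
    have hrow : aRow (d, acc) row
        = (row.foldl aStep d, acc ++ [row.map (fun l => (row.foldl aStep d).getD l 0)]) := by
      unfold aRow
      rw [inner_eq]
      simp
    have hcongr : row.map (fun l => (row.foldl aStep d).getD l 0)
        = row.map (fun l =>
            (rest.foldl (fun d ls => ls.foldl aStep d) (row.foldl aStep d)).getD l 0) := by
      apply List.map_congr_left
      intro l hl
      obtain ⟨v, hv⟩ := get?_buildL_of_mem row d l hl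
      rw [PySem.Dict.getD_of_get?_eq_some _ 0 hv,
          PySem.Dict.getD_of_get?_eq_some _ 0 (get?_buildLL_mono rest _ l v hv)]
    calc (row :: rest).foldl aRow (d, acc)
        = rest.foldl aRow (row.foldl aStep d,
            acc ++ [row.map (fun l => (row.foldl aStep d).getD l 0)]) := by
          rw [List.foldl_cons, hrow]
      _ = _ := by
          rw [ih]
          simp only [List.foldl_cons, List.map_cons, hcongr]
          simp

-- building row by row is building over the flattened labels
theorem buildLL_eq_flat (lls : List (List String)) (d : PySem.Dict String Int) :
    lls.foldl (fun d ls => ls.foldl aStep d) d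
      = (lls.flatMap (fun labels => labels)).foldl aStep d := by
  induction lls generalizing d with
  | nil => rfl
  | cons x xs ih => simp [List.foldl_append, ih]

-- the dict A builds from empty has exactly B's items
theorem items_buildL (xs : List String) :
    (xs.foldl aStep PySem.Dict.empty).items = pairsOf xs := by
  induction xs using List.reverseRecOn with
  | nil => simp [pairsOf, PySem.List.enumerate_nil]; rfl
  | append_singleton xs l ih =>
    rw [List.foldl_append, List.foldl_cons, List.foldl_nil]
    have hkeys : (xs.foldl aStep PySem.Dict.empty).keys = PySem.List.dedup xs := by
      show (xs.foldl aStep PySem.Dict.empty).items.map (·.1) = _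
      rw [ih]
      simp [pairsOf, List.map_map, Function.comp_def, PySem.List.map_snd_enumerate]
    by_cases hmem : l ∈ PySem.List.dedup xs
    · have hc : (xs.foldl aStep PySem.Dict.empty).contains l = true := by
        rw [PySem.Dict.contains_iff_mem_keys, hkeys]; exact hmem
      rw [aStep_of_contains _ _ hc, ih]
      simp only [pairsOf, PySem.List.dedup_eq_ofList, PySem.Set.ofList_append_singleton,
        PySem.Set.add_of_mem (PySem.List.dedup_eq_ofList xs ▸ hmem)]
    · have hc : (xs.foldl aStep PySem.Dict.empty).contains l = false := by
        rw [Bool.eq_false_iff]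
        intro h
        rw [PySem.Dict.contains_iff_mem_keys, hkeys] at h
        exact hmem h
      rw [aStep_of_not_contains _ _ hc,
          PySem.Dict.items_insert_of_not_contains _ _ hc, ih]
      have hsize : ((xs.foldl aStep PySem.Dict.empty).size : Int)
          = ((PySem.List.dedup xs).length : Int) := by
        show (((xs.foldl aStep PySem.Dict.empty).items.length : Nat) : Int) = _
        rw [ih]
        simp [pairsOf, PySem.List.length_enumerate]
      rw [hsize]
      simp only [pairsOf, PySem.List.dedup_eq_ofList, PySem.Set.ofList_append_singleton,
        PySem.Set.add_of_not_mem (PySem.List.dedup_eq_ofList xs ▸ hmem),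
        PySem.List.enumerate_append, PySem.List.enumerate_cons, PySem.List.enumerate_nil,
        List.map_append, List.map_cons, List.map_nil]
      have : (1 : Int) + ((PySem.Set.ofList xs).length : Int)
           = ((PySem.Set.ofList xs).length : Int) + 1 := by ring
      rw [this]

-- B's class_map IS the dict A ends with
theorem classMap_eq (lls : List (List String)) :
    PySem.Dict.ofList (pairsOf (lls.flatMap (fun labels => labels)))
      = lls.foldl (fun d ls => ls.foldl aStep d) PySem.Dict.empty := by
  apply PySem.Dict.ext
  rw [buildLL_eq_flat, items_buildL]
  simp only [PySem.Dict.ofList, PySem.Dict.update]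
  rw [PySem.Dict.items_foldl_insert_fresh (k := Prod.fst) (v := Prod.snd)]
  · simp [PySem.Dict.empty]
  · intro a _; rfl
  · simp only [pairsOf, List.map_map, Function.comp_def, PySem.List.map_snd_enumerate]
    exact PySem.List.nodup_dedup _

-- ===== VERDICT (by name: the statement is the Claim_ definition above) =====
theorem map_strLabels_spec : Claim_equal_map_strLabels := by
  intro lls _
  show map_strLabels lls = map_strLabels_alt lls
  simp only [map_strLabels, map_strLabels_alt]
  rw [outer_eq, ← classMap_eq]
  simp [pairsOf]
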